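-- pv_equiv track=rewrite | github.com/pohao82/vasp-omx-moment-setter | VaspOMXMomentSetter/utils/string_utils.py | find_start_by_char_transition
-- ===== SOURCE A (Python) =====
-- def find_start_by_char_transition(line, target_token_number=6):
--     """
--     Helper function implementing the transition-counting logic to find the
--     starting index of the Nth token (where N=6 for M_init).
--     """
--     current_transition = 0
--     in_token = False
--
--     for i, char in enumerate(line):
--         is_space = char.isspace()
--
--         if not is_space:
--             in_token = True
--         elif is_space and in_token:
--             # Transition: non-space to space (end of a token)
--             current_transition += 1
--             in_token = False
--
--             # If we've hit the end of the (N-1)th token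
--             if current_transition == target_token_number - 1:
--                 # Find the first non-space character of the Nth token (M_init)
--                 start_of_next_token = i
--                 return i
--                 #while start_of_next_token < len(line) and line[start_of_next_token].isspace():
--                 #    start_of_next_token += 1
--                 #return start_of_next_token
--
--     return -1
-- ===== SOURCE B (Python) =====
-- import re
--
-- def find_start_by_char_transition(line, target_token_number=6):
--     if target_token_number < 2:
--         return -1
--     matches = list(re.finditer(r'\S+', line))
--     idx = target_token_number - 2
--     if idx >= len(matches):
--         return -1
--     end = matches[idx].end()
--     return end if end < len(line) else -1
-- ===== Notes on version B (the rewrite author's own statement) =====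
-- stated objective: idiomatic
-- what changed: Replaced the character-by-character transition counter with in_token flag and early return by re.finditer(r'\S+') collecting all token spans, then a single indexed lookup of the (N-1)th token's end position.
import Mathlib
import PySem

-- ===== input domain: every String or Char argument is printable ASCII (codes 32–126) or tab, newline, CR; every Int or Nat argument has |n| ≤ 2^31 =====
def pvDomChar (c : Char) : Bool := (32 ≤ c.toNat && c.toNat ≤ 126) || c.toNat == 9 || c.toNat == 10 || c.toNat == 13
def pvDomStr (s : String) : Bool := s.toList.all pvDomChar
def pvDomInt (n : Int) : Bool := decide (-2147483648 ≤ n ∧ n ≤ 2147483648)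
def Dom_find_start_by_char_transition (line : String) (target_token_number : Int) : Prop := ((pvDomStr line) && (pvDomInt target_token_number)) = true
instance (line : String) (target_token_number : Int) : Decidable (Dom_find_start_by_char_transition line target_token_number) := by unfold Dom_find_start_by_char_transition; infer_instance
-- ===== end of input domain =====

-- B replaces A's transition-counting early-return loop by a precomputed table of
-- token end positions (re.finditer spans) and a single indexed lookup (objective: idiomatic).

-- ===== PORT A =====
-- A's for-loop with early return: index i, transition counter, in_token flag.
def pvALoop (target : Int) : List Char → Nat → Int → Bool → Int
  | [], _, _, _ => -1
  | c :: cs, i, ct, inTok =>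
    if ¬ PySem.Chars.isspace c then
      pvALoop target cs (i + 1) ct true
    else if inTok then
      if ct + 1 = target - 1 then (i : Int)
      else pvALoop target cs (i + 1) (ct + 1) false
    else
      pvALoop target cs (i + 1) ct inTok

def find_start_by_char_transition (line : String) (target_token_number : Int) : Int :=
  pvALoop target_token_number line.toList 0 0 false

-- ===== PORT B =====
-- end positions of all maximal non-space runs (the .end() of each re.finditer(r'\S+') match)
def pvRunEnds : List Char → Nat → Bool → List Nat
  | [], i, inTok => if inTok then [i] else []
  | c :: cs, i, inTok =>
    if PySem.Chars.isspace c then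
      if inTok then i :: pvRunEnds cs (i + 1) false
      else pvRunEnds cs (i + 1) false
    else
      pvRunEnds cs (i + 1) true

def find_start_by_char_transition_alt (line : String) (target_token_number : Int) : Int :=
  if target_token_number < 2 then -1
  else
    let spans := pvRunEnds line.toList 0 false
    let idx := (target_token_number - 2).toNat
    match spans[idx]? with
    | none => -1
    | some e => if e < line.toList.length then (e : Int) else -1

-- ===== PRECONDITION & SPEC =====
def Spec_find_start_by_char_transition (line : String) (target_token_number : Int) (out : Int) : Prop := out = find_start_by_char_transition_alt line target_token_number
instance (line : String) (target_token_number : Int) (out : Int) : Decidable (Spec_find_start_by_char_transition line target_token_number out) := by unfold Spec_find_start_by_char_transition; infer_instance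

-- ===== CLAIM (what is proved, stated in full; the proofs are below) =====
def Claim_equal_find_start_by_char_transition : Prop := ∀ (line : String) (target_token_number : Int), Dom_find_start_by_char_transition line target_token_number → Spec_find_start_by_char_transition line target_token_number (find_start_by_char_transition line target_token_number)

-- ===== LEMMAS AND PROOFS =====

-- transition positions only (run ends that are followed by a space), i.e. pvRunEnds
-- without the possible final end-of-string entry
def pvTrans : List Char → Nat → Bool → List Nat
  | [], _, _ => []
  | c :: cs, i, inTok =>
    if PySem.Chars.isspace c then
      if inTok then i :: pvTrans cs (i + 1) false
      else pvTrans cs (i + 1) false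
    else
      pvTrans cs (i + 1) true

theorem pvALoop_eq_trans (target : Int) (cs : List Char) :
    ∀ (i : Nat) (ct : Int) (inTok : Bool),
      pvALoop target cs i ct inTok =
        (if 0 ≤ target - 2 - ct then
          match (pvTrans cs i inTok)[(target - 2 - ct).toNat]? with
          | none => -1
          | some e => (e : Int)
        else -1) := by
  induction cs with
  | nil =>
    intro i ct inTok
    simp [pvALoop, pvTrans]
  | cons c cs ih =>
    intro i ct inTok
    by_cases hs : PySem.Chars.isspace c
    · by_cases ht : inTok
      · by_cases he : ct + 1 = target - 1
        · have h0 : target - 2 - ct = 0 := by omega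
          simp [pvALoop, pvTrans, hs, ht, he, h0]
        · rw [show pvALoop target (c :: cs) i ct inTok
              = pvALoop target cs (i + 1) (ct + 1) false by
                simp [pvALoop, hs, ht, he]]
          rw [ih (i + 1) (ct + 1) false]
          by_cases hge : 0 ≤ target - 2 - ct
          · have hpos : 0 < target - 2 - ct := by omega
            have hn : (target - 2 - ct).toNat = (target - 2 - (ct + 1)).toNat + 1 := by omega
            simp only [pvTrans, hs, ht, if_true, hn]
            rw [if_pos hge, if_pos (by omega : (0:Int) ≤ target - 2 - (ct + 1))]
            simp
          · rw [if_neg (by omega : ¬ (0:Int) ≤ target - 2 - (ct + 1)), if_neg hge]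
      · rw [show pvALoop target (c :: cs) i ct inTok = pvALoop target cs (i + 1) ct inTok by
              simp [pvALoop, hs, ht]]
        rw [ih (i + 1) ct inTok]
        simp [pvTrans, hs, ht]
    · rw [show pvALoop target (c :: cs) i ct inTok = pvALoop target cs (i + 1) ct true by
            simp [pvALoop, hs]]
      rw [ih (i + 1) ct true]
      simp [pvTrans, hs]

theorem pvRunEnds_eq (cs : List Char) :
    ∀ (i : Nat) (inTok : Bool),
      pvRunEnds cs i inTok =
        pvTrans cs i inTok ++
          (if cs.foldl (fun _ c => !PySem.Chars.isspace c) inTok then [i + cs.length] else []) := by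
  induction cs with
  | nil => intro i inTok; cases inTok <;> simp [pvRunEnds, pvTrans]
  | cons c cs ih =>
    intro i inTok
    by_cases hs : PySem.Chars.isspace c
    · by_cases ht : inTok <;>
        simp [pvRunEnds, pvTrans, hs, ht, ih (i + 1), Nat.add_assoc, Nat.add_comm 1 cs.length]
    · simp [pvRunEnds, pvTrans, hs, ih (i + 1), Nat.add_assoc, Nat.add_comm 1 cs.length]

theorem pvTrans_lt (cs : List Char) :
    ∀ (i : Nat) (inTok : Bool) (x : Nat), x ∈ pvTrans cs i inTok → x < i + cs.length := by
  induction cs with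
  | nil => intro i inTok x hx; simp [pvTrans] at hx
  | cons c cs ih =>
    intro i inTok x hx
    simp only [List.length_cons]
    by_cases hs : PySem.Chars.isspace c
    · by_cases ht : inTok
      · simp [pvTrans, hs, ht] at hx
        rcases hx with rfl | hx
        · omega
        · have := ih (i + 1) false x hx; omega
      · simp [pvTrans, hs, ht] at hx
        have := ih (i + 1) false x hx; omega
    · simp [pvTrans, hs] at hx
      have := ih (i + 1) true x hx; omega

theorem pvLookupAppend (ts rest : List Nat) (L n : Nat)
    (hts : ∀ x ∈ ts, x < L) (hrest : ∀ x ∈ rest, x = L) :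
    (match ts[n]? with | none => (-1 : Int) | some e => (e : Int)) =
    (match (ts ++ rest)[n]? with
     | none => (-1 : Int)
     | some e => if e < L then (e : Int) else -1) := by
  rcases Nat.lt_or_ge n ts.length with hlt | hge
  · rw [List.getElem?_append, if_pos hlt]
    obtain ⟨e, he⟩ : ∃ e, ts[n]? = some e := ⟨ts[n], List.getElem?_eq_getElem hlt⟩
    rw [he]
    have : e < L := hts e (List.mem_of_getElem? he)
    simp [this]
  · rw [List.getElem?_append, if_neg (by omega), List.getElem?_eq_none hge]
    cases hrs : rest[n - ts.length]? with
    | none => rfl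
    | some e =>
      have : e = L := hrest e (List.mem_of_getElem? hrs)
      simp [this]

-- ===== VERDICT (by name: the statement is the Claim_ definition above) =====
theorem find_start_by_char_transition_spec : Claim_equal_find_start_by_char_transition := by
  intro line target _
  unfold Spec_find_start_by_char_transition
  unfold find_start_by_char_transition find_start_by_char_transition_alt
  rw [pvALoop_eq_trans]
  by_cases h2 : target < 2
  · rw [if_neg (by omega : ¬ (0:Int) ≤ target - 2 - 0), if_pos h2]
  · rw [if_pos (by omega : (0:Int) ≤ target - 2 - 0), if_neg h2]
    rw [show target - 2 - 0 = target - 2 from by ring]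
    show _ = (match (pvRunEnds line.toList 0 false)[(target - 2).toNat]? with
              | none => (-1 : Int)
              | some e => if e < line.toList.length then (e : Int) else -1)
    rw [pvRunEnds_eq]
    refine pvLookupAppend _ _ _ _ ?_ ?_
    · intro x hx
      simpa using pvTrans_lt line.toList 0 false x hx
    · intro x hx
      split at hx
      · simp only [Nat.zero_add, List.mem_singleton] at hx
        omega
      · simp at hx
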